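-- pv_equiv track=rewrite | github.com/Van0m/OfflineChat-Converter | converter_app.py | reverse_phonetic_string
-- ===== SOURCE A (Python) =====
-- def reverse_phonetic_string(input_string):
--     reverse_mapping = {
--         'iuh': 'i',
--         'auh': 'a',
--         'ouh': 'o',
--     }
--
--     words = input_string.split(' ')
--     original_words = []
--
--     current_word = []
--     for part in words:
--         if part in reverse_mapping:
--             current_word.append(reverse_mapping[part])
--         elif part.endswith('uh') and len(part) > 2:
--             current_word.append(part[:-2])
--         else:
--             if current_word:
--                 original_words.append("".join(current_word))
--             current_word = []
--             original_words.append(part)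
--
--     if current_word:
--         original_words.append("".join(current_word))
--
--     return " ".join(original_words).strip()
-- ===== SOURCE B (Python) =====
-- def reverse_phonetic_string(input_string):
--     reverse_mapping = {
--         'iuh': 'i',
--         'auh': 'a',
--         'ouh': 'o',
--     }
--
--     def classify(part):
--         if part in reverse_mapping:
--             return (True, reverse_mapping[part])
--         elif part.endswith('uh') and len(part) > 2:
--             return (True, part[:-2])
--         else:
--             return (False, part)
--
--     classified = [classify(part) for part in input_string.split(' ')]
--
--     words = []
--     i = 0
--     n = len(classified)
--     while i < n:
--         if classified[i][0]:
--             j = i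
--             while j < n and classified[j][0]:
--                 j += 1
--             words.append(''.join(v for _, v in classified[i:j]))
--             i = j
--         else:
--             words.append(classified[i][1])
--             i += 1
--
--     return ' '.join(words).strip()
-- ===== Notes on version B (the rewrite author's own statement) =====
-- stated objective: alternative
-- what changed: Replaced A's stateful flush-on-non-phonetic accumulator loop by a two-phase decomposition: classify every part into an (is_phonetic, value) pair, then group maximal runs of phonetic parts into single words in a separate scan.
import Mathlib
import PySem

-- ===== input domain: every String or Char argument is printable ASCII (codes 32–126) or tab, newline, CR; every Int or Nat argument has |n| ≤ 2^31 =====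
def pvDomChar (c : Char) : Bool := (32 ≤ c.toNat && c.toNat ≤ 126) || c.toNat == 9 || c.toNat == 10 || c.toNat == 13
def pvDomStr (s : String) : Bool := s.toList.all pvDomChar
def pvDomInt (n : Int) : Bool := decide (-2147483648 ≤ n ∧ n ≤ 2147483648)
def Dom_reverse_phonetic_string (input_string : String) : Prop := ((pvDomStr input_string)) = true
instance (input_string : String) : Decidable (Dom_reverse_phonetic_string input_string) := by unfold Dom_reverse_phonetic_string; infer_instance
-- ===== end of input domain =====

-- B replaces A's flush-on-non-phonetic accumulator loop by a classify-then-group-runs decomposition (alternative, same cost).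

-- ===== PORT A =====
def pvMapA : PySem.Dict String String :=
  PySem.Dict.ofList [("iuh", "i"), ("auh", "a"), ("ouh", "o")]

-- A's for-loop over the parts, state = (original_words, current_word); the trailing flush is the [] case.
def pvLoopA : List String → List String → List String → List String
  | [], ows, cw => if cw ≠ [] then ows ++ [PySem.Str.join "" cw] else ows
  | p :: rest, ows, cw =>
    match pvMapA.get? p with
    | some v => pvLoopA rest ows (cw ++ [v])
    | none =>
      if PySem.Str.endswith p "uh" && decide (2 < PySem.Str.len p) then
        pvLoopA rest ows (cw ++ [PySem.Str.slice p none (some (-2))])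
      else
        pvLoopA rest ((if cw ≠ [] then ows ++ [PySem.Str.join "" cw] else ows) ++ [p]) []

def reverse_phonetic_string (input_string : String) : String :=
  PySem.Str.strip (PySem.Str.join " " (pvLoopA ((PySem.Str.split? input_string " ").getD []) [] []))

-- ===== PORT B =====
def pvMapB : PySem.Dict String String :=
  PySem.Dict.ofList [("iuh", "i"), ("auh", "a"), ("ouh", "o")]

def pvClassifyB (p : String) : Bool × String :=
  match pvMapB.get? p with
  | some v => (true, v)
  | none =>
    if PySem.Str.endswith p "uh" && decide (2 < PySem.Str.len p) then
      (true, PySem.Str.slice p none (some (-2)))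
    else
      (false, p)

-- B's run-grouping scan: a phonetic run (i..j in Source B, takeWhile/dropWhile here) joins into one word.
def pvGroupB : List (Bool × String) → List String
  | [] => []
  | (b, v) :: rest =>
    if b then
      PySem.Str.join "" (v :: (rest.takeWhile (·.1)).map (·.2)) :: pvGroupB (rest.dropWhile (·.1))
    else
      v :: pvGroupB rest
termination_by l => l.length
decreasing_by
  · have := List.length_dropWhile_le (fun x : Bool × String => x.1) rest
    simp; omega
  · simp

def reverse_phonetic_string_alt (input_string : String) : String :=
  PySem.Str.strip (PySem.Str.join " "
    (pvGroupB (((PySem.Str.split? input_string " ").getD []).map pvClassifyB)))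

-- ===== PRECONDITION & SPEC =====
def Spec_reverse_phonetic_string (input_string : String) (out : String) : Prop := out = reverse_phonetic_string_alt input_string
instance (input_string : String) (out : String) : Decidable (Spec_reverse_phonetic_string input_string out) := by unfold Spec_reverse_phonetic_string; infer_instance

-- ===== CLAIM (what is proved, stated in full; the proofs are below) =====
def Claim_equal_reverse_phonetic_string : Prop := ∀ (input_string : String), Dom_reverse_phonetic_string input_string → Spec_reverse_phonetic_string input_string (reverse_phonetic_string input_string)

-- ===== LEMMAS AND PROOFS =====

theorem pvGroupB_nil : pvGroupB [] = [] := by rw [pvGroupB]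

theorem pvGroupB_cons (b : Bool) (v : String) (rest : List (Bool × String)) :
    pvGroupB ((b, v) :: rest) =
      if b then
        PySem.Str.join "" (v :: (rest.takeWhile (·.1)).map (·.2)) :: pvGroupB (rest.dropWhile (·.1))
      else v :: pvGroupB rest := by rw [pvGroupB]

-- What pvGroupB computes when a nonempty pending buffer cw precedes the list.
def pvPrerun (cw : List String) (l : List (Bool × String)) : List String :=
  if cw = [] then pvGroupB l
  else PySem.Str.join "" (cw ++ (l.takeWhile (·.1)).map (·.2)) :: pvGroupB (l.dropWhile (·.1))

theorem pvPrerun_nil (cw : List String) :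
    pvPrerun cw [] = if cw ≠ [] then [PySem.Str.join "" cw] else [] := by
  by_cases h : cw = [] <;> simp [pvPrerun, pvGroupB_nil, h]

theorem pvPrerun_true (cw : List String) (v : String) (l : List (Bool × String)) :
    pvPrerun cw ((true, v) :: l) = pvPrerun (cw ++ [v]) l := by
  by_cases h : cw = []
  · subst h
    simp [pvPrerun, pvGroupB_cons]
  · simp [pvPrerun, h, List.takeWhile, List.dropWhile]

theorem pvPrerun_false (cw : List String) (v : String) (l : List (Bool × String)) :
    pvPrerun cw ((false, v) :: l) =
      (if cw ≠ [] then [PySem.Str.join "" cw] else []) ++ v :: pvGroupB l := by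
  by_cases h : cw = []
  · subst h
    simp [pvPrerun, pvGroupB_cons]
  · simp [pvPrerun, h, pvGroupB_cons, List.takeWhile, List.dropWhile]

theorem pvLoopA_eq (parts : List String) :
    ∀ (ows cw : List String),
      pvLoopA parts ows cw = ows ++ pvPrerun cw (parts.map pvClassifyB) := by
  induction parts with
  | nil =>
    intro ows cw
    by_cases h : cw = [] <;> simp [pvLoopA, pvPrerun_nil, h]
  | cons p rest ih =>
    intro ows cw
    have hmap : pvMapA = pvMapB := rfl
    cases hm : pvMapB.get? p with
    | some v =>
      have hc : pvClassifyB p = (true, v) := by simp [pvClassifyB, hm]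
      simp only [pvLoopA, hmap, hm, List.map, hc, pvPrerun_true]
      exact ih ows (cw ++ [v])
    | none =>
      by_cases he : (PySem.Str.endswith p "uh" && decide (2 < PySem.Str.len p)) = true
      · have hc : pvClassifyB p = (true, PySem.Str.slice p none (some (-2))) := by
          unfold pvClassifyB; rw [hm, if_pos he]
        simp only [pvLoopA, hmap, hm, List.map, hc, pvPrerun_true]
        rw [if_pos he]
        exact ih ows (cw ++ [PySem.Str.slice p none (some (-2))])
      · have hc : pvClassifyB p = (false, p) := by
          unfold pvClassifyB; rw [hm, if_neg he]
        simp only [pvLoopA, hmap, hm, List.map, hc, pvPrerun_false]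
        rw [if_neg he, ih]
        by_cases h : cw = [] <;> simp [pvPrerun, h]

-- ===== VERDICT (by name: the statement is the Claim_ definition above) =====
theorem reverse_phonetic_string_spec : Claim_equal_reverse_phonetic_string := by
  intro s _
  show _ = _
  unfold reverse_phonetic_string reverse_phonetic_string_alt
  rw [pvLoopA_eq]
  simp [pvPrerun]
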